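-- pv_equiv track=rewrite | github.com/dashanhust/leetcode | algorithm/1498_number_of_subsequences_that_satisfy_the_given_sum_condition.py | numSubseq
-- ===== SOURCE A (Python) =====
-- from typing import List
-- import bisect
--
-- def numSubseq(nums: List[int], target: int) -> int:
--     lenNums = len(nums)
--     nums.sort()
--     ans = 0
--     fPower, twoPower =[], 1
--     p = 10 ** 9 + 7
--
--     # 获取各种下表元素的贡献值，例如假设最小值与最大值的距离为 i 那么这个最小值对于答案的贡献值就为 2^i
--     for _ in range(lenNums):
--         fPower.append(twoPower)
--         twoPower <<= 1
--
--     for left, val in enumerate(nums):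
--         # 以left作为最小值，为了方便的找到最大值 target - left 的位置下表，这里我们使用一个小技巧
--         # 找到 target - left 的bisect_right位置然后再减去1，主要是为了让所有等于 target - left 的元素也能够包含在窗口中
--         if (val << 1) > target: break
--         right = bisect.bisect_right(nums, target - val) - 1
--         ans  += fPower[right - left] % p
--     return ans % p
-- ===== SOURCE B (Python) =====
-- def numSubseq(nums, target):
--     MOD = 10 ** 9 + 7
--     nums.sort()
--     ans = 0
--     lo, hi = 0, len(nums) - 1
--     while lo <= hi:
--         if nums[lo] + nums[hi] <= target:
--             ans = (ans + pow(2, hi - lo, MOD)) % MOD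
--             lo += 1
--         else:
--             hi -= 1
--     return ans % MOD
-- ===== Notes on version B (the rewrite author's own statement) =====
-- stated objective: faster
-- what changed: Replaces the per-element bisect_right binary search (and the precomputed power table) with a single inward two-pointer sweep using modular pow.
import Mathlib
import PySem

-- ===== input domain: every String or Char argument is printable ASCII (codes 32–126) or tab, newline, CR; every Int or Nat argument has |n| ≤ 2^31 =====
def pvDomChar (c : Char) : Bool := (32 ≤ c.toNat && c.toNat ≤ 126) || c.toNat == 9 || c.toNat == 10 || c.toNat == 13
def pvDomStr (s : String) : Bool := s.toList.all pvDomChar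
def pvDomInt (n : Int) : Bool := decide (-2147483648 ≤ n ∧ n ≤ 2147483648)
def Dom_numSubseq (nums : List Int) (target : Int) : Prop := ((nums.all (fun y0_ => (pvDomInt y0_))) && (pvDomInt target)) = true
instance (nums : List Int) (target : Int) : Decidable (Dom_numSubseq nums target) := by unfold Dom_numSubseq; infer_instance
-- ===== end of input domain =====

-- B replaces A's per-element binary search and big-int power table by one inward
-- two-pointer sweep with modular pow.  Both A and B sort `nums` in place (a
-- caller-visible mutation); the equivalence proved here is about the return value only.

-- ===== PORT A =====
-- A's second loop: `for left, val in enumerate(nums): if (val << 1) > target: break; …`.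
-- `val << 1` is ported as `val * 2` (exact for Int); `bisect.bisect_right` is
-- PySem.List.bisectRight; `fPower[right - left]` is pyGetD (the index is in range
-- whenever the loop body runs, so Python never raises there).
def numSubseqLoopA (s : List Int) (target : Int) (fPower : List Int) (p : Int) :
    List (Int × Int) → Int → Int
  | [], ans => ans
  | (left, val) :: rest, ans =>
    if val * 2 > target then ans
    else
      let right : Int := (PySem.List.bisectRight s (target - val) : Int) - 1
      numSubseqLoopA s target fPower p rest
        (ans + PySem.Int.mod (PySem.List.pyGetD fPower (right - left) 0) p)

def numSubseq (nums : List Int) (target : Int) : Int :=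
  let lenNums := nums.length
  let s := PySem.List.sorted nums (fun x => x) false
  let p : Int := 10 ^ 9 + 7
  -- `for _ in range(lenNums): fPower.append(twoPower); twoPower <<= 1`
  let fPower := ((PySem.List.pyRange 0 (lenNums : Int) 1).foldl
      (fun (st : List Int × Int) _ => (st.1 ++ [st.2], st.2 * 2)) ([], 1)).1
  PySem.Int.mod (numSubseqLoopA s target fPower p (PySem.List.enumerate s 0) 0) p

-- ===== PORT B =====
-- `while lo <= hi: if nums[lo] + nums[hi] <= target: ans = (ans + pow(2, hi-lo, MOD)) % MOD; lo += 1
--  else: hi -= 1` — pow(2, e, MOD) is PySem.Int.powMod (e = hi-lo ≥ 0 in that branch);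
-- nums[lo], nums[hi] are pyGetD (indices are in range while the loop runs).
def numSubseqLoopB (s : List Int) (target MOD : Int) (lo hi ans : Int) : Int :=
  if _h : lo ≤ hi then
    if PySem.List.pyGetD s lo 0 + PySem.List.pyGetD s hi 0 ≤ target then
      numSubseqLoopB s target MOD (lo + 1) hi
        (PySem.Int.mod (ans + PySem.Int.powMod 2 (hi - lo).toNat MOD) MOD)
    else
      numSubseqLoopB s target MOD lo (hi - 1) ans
  else ans
termination_by (hi + 1 - lo).toNat
decreasing_by all_goals omega

def numSubseq_alt (nums : List Int) (target : Int) : Int :=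
  let MOD : Int := 10 ^ 9 + 7
  let s := PySem.List.sorted nums (fun x => x) false
  PySem.Int.mod (numSubseqLoopB s target MOD 0 ((s.length : Int) - 1) 0) MOD

-- ===== PRECONDITION & SPEC =====
def Spec_numSubseq (nums : List Int) (target : Int) (out : Int) : Prop := out = numSubseq_alt nums target
instance (nums : List Int) (target : Int) (out : Int) : Decidable (Spec_numSubseq nums target out) := by unfold Spec_numSubseq; infer_instance

-- ===== CLAIM (what is proved, stated in full; the proofs are below) =====
def Claim_equal_numSubseq : Prop := ∀ (nums : List Int) (target : Int), Dom_numSubseq nums target → Spec_numSubseq nums target (numSubseq nums target)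

-- ===== LEMMAS AND PROOFS =====

-- contribution of index `left` of the sorted list to the answer (both programs sum these)
def pvG (s : List Int) (target : Int) (left : Nat) : Int :=
  if 2 * s.getD left 0 ≤ target then
    (2 : Int) ^ (PySem.List.bisectRight s (target - s.getD left 0) - 1 - left) % (10 ^ 9 + 7)
  else 0

theorem pv_getD_mono {s : List Int} (hs : s.Pairwise (· ≤ ·)) {i j : Nat}
    (hij : i ≤ j) (hj : j < s.length) : s.getD i 0 ≤ s.getD j 0 := by
  rcases Nat.lt_or_ge i j with h | h
  · have := (List.pairwise_iff_getElem.mp hs) i j (by omega) hj h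
    rwa [List.getD_eq_getElem s 0 (by omega), List.getD_eq_getElem s 0 hj]
  · have : i = j := by omega
    subst this; exact le_refl _

theorem pv_pyGetD_nonneg (xs : List Int) (i : Int) (d : Int) (h : 0 ≤ i) :
    PySem.List.pyGetD xs i d = xs.getD i.toNat d := by
  have h2 := PySem.List.pyGetD_natCast xs i.toNat d
  rwa [Int.toNat_of_nonneg h] at h2

theorem pv_powtab (L : List Int) : ∀ (acc : List Int) (t : Int),
    L.foldl (fun (st : List Int × Int) _ => (st.1 ++ [st.2], st.2 * 2)) (acc, t)
      = (acc ++ (List.range L.length).map (fun i => t * 2 ^ i), t * 2 ^ L.length) := by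
  induction L with
  | nil => intro acc t; simp
  | cons x tl ih =>
      intro acc t
      simp only [List.foldl_cons, ih, List.length_cons, List.range_succ_eq_map,
        List.map_cons, List.map_map, Prod.mk.injEq]
      refine ⟨?_, by ring⟩
      rw [pow_zero, mul_one, List.append_assoc, List.singleton_append]
      congr 1
      congr 1
      apply List.map_congr_left
      intro i _
      simp only [Function.comp_apply, pow_succ, Nat.succ_eq_add_one]
      ring

theorem pv_aLoop_sum (s : List Int) (target : Int) (hs : s.Pairwise (· ≤ ·)) :
    ∀ (tl : List Int) (left : Nat) (ans : Int), tl = s.drop left →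
    numSubseqLoopA s target ((List.range s.length).map (fun i => (2:Int) ^ i)) (10 ^ 9 + 7)
        (PySem.List.enumerate tl (left : Int)) ans
      = ans + ∑ i ∈ Finset.Ico left s.length, pvG s target i := by
  intro tl
  induction tl with
  | nil =>
      intro left ans h
      have hlen : s.length ≤ left := by
        have := List.drop_eq_nil_iff.mp h.symm; omega
      simp [PySem.List.enumerate, numSubseqLoopA, Finset.Ico_eq_empty (by omega : ¬ left < s.length)]
  | cons val tl' ih =>
      intro left ans h
      have h' : List.drop left s = val :: tl' := h.symm
      have hlt : left < s.length := by
        by_contra hc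
        rw [List.drop_eq_nil_iff.mpr (by omega)] at h'; simp at h'
      have hval : s.getD left 0 = val := by
        have h0 : s[left]? = some val := by
          have h1 := List.getElem?_drop (xs := s) (i := left) (j := 0)
          rw [h'] at h1
          simpa using h1.symm
        rw [List.getD_eq_getElem?_getD, h0]; rfl
      have htl' : tl' = s.drop (left + 1) := by
        rw [← List.tail_drop, h']
        rfl
      rw [show PySem.List.enumerate (val :: tl') (left : Int)
            = ((left : Int), val) :: PySem.List.enumerate tl' ((left : Int) + 1) from rfl]
      rw [show ((left : Int) + 1) = ((left + 1 : Nat) : Int) by push_cast; ring]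
      rw [numSubseqLoopA]
      by_cases hb : val * 2 > target
      · simp only [if_pos hb]
        have hz : ∑ i ∈ Finset.Ico left s.length, pvG s target i = 0 := by
          apply Finset.sum_eq_zero
          intro i hi
          simp only [Finset.mem_Ico] at hi
          have hge : val ≤ s.getD i 0 := by
            rw [← hval]; exact pv_getD_mono hs hi.1 hi.2
          unfold pvG
          rw [if_neg (by omega)]
        rw [hz]; ring
      · simp only [if_neg hb]
        have hb2 : val * 2 ≤ target := by omega
        clear hb
        set x : Int := target - val with hx
        obtain ⟨hble, hblo, hbhi⟩ := PySem.List.bisectRight_spec s x hs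
        set b : Nat := PySem.List.bisectRight s x with hbdef
        have hxl : s.getD left 0 ≤ x := by rw [hval]; omega
        have hlb : left < b := by
          by_contra hc
          have := hbhi left hlt (by omega)
          rw [← List.getD_eq_getElem s 0 hlt] at this
          omega
        -- the index into fPower
        have hidx : ((b : Int) - 1 - (left : Int)) = (((b - 1 - left : Nat)) : Int) := by
          push_cast [Nat.cast_sub (by omega : left ≤ b - 1), Nat.cast_sub (by omega : 1 ≤ b)]
          ring
        have hklt : b - 1 - left < s.length := by omega
        have hterm : PySem.Int.mod
            (PySem.List.pyGetD ((List.range s.length).map (fun i => (2:Int) ^ i))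
              ((b : Int) - 1 - (left : Int)) 0) (10 ^ 9 + 7) = pvG s target left := by
          rw [hidx, PySem.List.pyGetD_natCast, PySem.List.getD_map_range _ _ _ _ hklt]
          unfold pvG
          rw [hval, if_pos (by omega), ← hx, ← hbdef,
            PySem.Int.mod_eq_emod_of_pos (by norm_num)]
        rw [hterm, ih (left + 1) _ htl',
          Finset.sum_eq_sum_Ico_succ_bot hlt (pvG s target)]
        ring

theorem pv_bLoop_sum (s : List Int) (target : Int) (hs : s.Pairwise (· ≤ ·)) :
    ∀ (m : Nat) (lo hi ans : Int), (hi + 1 - lo).toNat = m →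
    0 ≤ lo → hi < (s.length : Int) → 0 ≤ ans → ans < 10 ^ 9 + 7 →
    (∀ j : Nat, hi < (j : Int) → j < s.length →
       ∀ i : Nat, lo ≤ (i : Int) → i < s.length → target < s.getD i 0 + s.getD j 0) →
    numSubseqLoopB s target (10 ^ 9 + 7) lo hi ans
      = (ans + ∑ i ∈ Finset.Ico lo.toNat s.length, pvG s target i) % (10 ^ 9 + 7) := by
  intro m
  induction m using Nat.strong_induction_on with
  | _ m IH =>
    intro lo hi ans hm hlo hhi hans0 hans1 hinv
    rw [numSubseqLoopB]
    by_cases hcond : lo ≤ hi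
    · have hhi0 : 0 ≤ hi := le_trans hlo hcond
      have hlolen : lo < (s.length : Int) := lt_of_le_of_lt hcond hhi
      have hgl : PySem.List.pyGetD s lo 0 = s.getD lo.toNat 0 := pv_pyGetD_nonneg s lo 0 hlo
      have hgh : PySem.List.pyGetD s hi 0 = s.getD hi.toNat 0 := pv_pyGetD_nonneg s hi 0 hhi0
      rw [dif_pos hcond]
      by_cases hle : PySem.List.pyGetD s lo 0 + PySem.List.pyGetD s hi 0 ≤ target
      · rw [if_pos hle]
        rw [hgl, hgh] at hle
        have hmono : s.getD lo.toNat 0 ≤ s.getD hi.toNat 0 :=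
          pv_getD_mono hs (by omega) (by omega)
        set x : Int := target - s.getD lo.toNat 0 with hx
        obtain ⟨hble, hblo, hbhi⟩ := PySem.List.bisectRight_spec s x hs
        set b : Nat := PySem.List.bisectRight s x with hbdef
        -- b = hi.toNat + 1
        have hb : b = hi.toNat + 1 := by
          rcases Nat.lt_or_ge b (hi.toNat + 1) with hc | hc
          · exfalso
            have := hbhi hi.toNat (by omega) (by omega)
            rw [← List.getD_eq_getElem s 0 (by omega)] at this
            omega
          · rcases Nat.lt_or_ge (hi.toNat + 1) b with hc2 | hc2
            · exfalso
              have hj : hi.toNat + 1 < s.length := by omega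
              have h1 := hblo (hi.toNat + 1) hj hc2
              rw [← List.getD_eq_getElem s 0 hj] at h1
              have h2 := hinv (hi.toNat + 1) (by omega) hj lo.toNat (by omega) (by omega)
              omega
            · omega
        have hG : pvG s target lo.toNat = (2 : Int) ^ (hi - lo).toNat % (10 ^ 9 + 7) := by
          unfold pvG
          rw [if_pos (by omega), ← hx, ← hbdef, hb]
          congr 2
          omega
        rw [PySem.Int.powMod_eq_emod 2 (hi - lo).toNat (by norm_num : (0:Int) < 10 ^ 9 + 7),
          PySem.Int.mod_eq_emod_of_pos (by norm_num)]
        rw [IH (hi + 1 - (lo + 1)).toNat (by omega) (lo + 1) hi _ rfl (by omega) hhi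
          (Int.emod_nonneg _ (by norm_num)) (Int.emod_lt_of_pos _ (by norm_num))
          (by intro j hj1 hj2 i hi1 hi2; exact hinv j hj1 hj2 i (by omega) hi2)]
        rw [show (lo + 1).toNat = lo.toNat + 1 by omega,
          Finset.sum_eq_sum_Ico_succ_bot (by omega : lo.toNat < s.length) (pvG s target), hG,
          Int.emod_add_emod]
        congr 1
        ring
      · rw [if_neg hle]
        rw [hgl, hgh] at hle
        have hle2 : target < s.getD lo.toNat 0 + s.getD hi.toNat 0 := by omega
        clear hle
        apply IH (hi - 1 + 1 - lo).toNat (by omega) lo (hi - 1) ans rfl hlo (by omega) hans0 hans1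
        intro j hj1 hj2 i hi1 hi2
        by_cases hjh : hi < (j : Int)
        · exact hinv j hjh hj2 i hi1 hi2
        · have hjeq : (j : Int) = hi := by omega
          have : s.getD lo.toNat 0 ≤ s.getD i 0 := pv_getD_mono hs (by omega) hi2
          have hj' : s.getD j 0 = s.getD hi.toNat 0 := by
            congr 1; omega
          omega
    · rw [dif_neg hcond]
      have hz : ∑ i ∈ Finset.Ico lo.toNat s.length, pvG s target i = 0 := by
        apply Finset.sum_eq_zero
        intro i hi
        simp only [Finset.mem_Ico] at hi
        have := hinv i (by omega) hi.2 i (by omega) hi.2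
        unfold pvG
        rw [if_neg (by omega)]
      rw [hz, add_zero, Int.emod_eq_of_lt hans0 hans1]

theorem pv_both (nums : List Int) (target : Int) :
    numSubseq nums target = numSubseq_alt nums target := by
  set s := PySem.List.sorted nums (fun x => x) false with hsdef
  have hs : s.Pairwise (· ≤ ·) := by
    have := PySem.List.sorted_pairwise nums (fun x => x)
    simpa using this
  have hsl : s.length = nums.length := by
    rw [hsdef]; exact PySem.List.length_sorted nums (fun x => x) false
  have hA : numSubseq nums target
      = (0 + ∑ i ∈ Finset.Ico 0 s.length, pvG s target i) % (10 ^ 9 + 7) := by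
    have hlen : (PySem.List.pyRange 0 (nums.length : Int) 1).length = nums.length := by
      simp [PySem.List.pyRange_zero_natCast]
    have hfp : ((PySem.List.pyRange 0 (nums.length : Int) 1).foldl
        (fun (st : List Int × Int) _ => (st.1 ++ [st.2], st.2 * 2)) ([], 1)).1
        = (List.range s.length).map (fun i => (2:Int) ^ i) := by
      rw [pv_powtab, hlen, hsl]; simp
    simp only [numSubseq, ← hsdef, hfp]
    have hmain := pv_aLoop_sum s target hs s 0 0 (by simp)
    rw [Nat.cast_zero] at hmain
    rw [hmain, PySem.Int.mod_eq_emod_of_pos (by norm_num)]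
  have hB : numSubseq_alt nums target
      = (0 + ∑ i ∈ Finset.Ico 0 s.length, pvG s target i) % (10 ^ 9 + 7) := by
    unfold numSubseq_alt
    rw [← hsdef, PySem.Int.mod_eq_emod_of_pos (by norm_num)]
    rw [pv_bLoop_sum s target hs ((s.length : Int) - 1 + 1 - 0).toNat 0 ((s.length : Int) - 1) 0
      rfl (by omega) (by omega) (by omega) (by norm_num)
      (by intro j hj1 hj2 i hi1 hi2; exfalso; omega)]
    rw [show (0 : Int).toNat = 0 from rfl, Int.emod_emod_of_dvd _ dvd_rfl]
  rw [hA, hB]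

-- ===== VERDICT (by name: the statement is the Claim_ definition above) =====
theorem numSubseq_spec : Claim_equal_numSubseq := by
  intro nums target _
  unfold Spec_numSubseq
  exact pv_both nums target
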